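-- pv_equiv track=rewrite | github.com/Meeraq/operations-backend | schedularApi/tasks.py | swap_positions
-- ===== SOURCE A (Python) =====
-- def swap_positions(length):
--     numbers = list(range(1, length + 1))
--
--     midpoint = length // 2
--
--     for i in range(midpoint):
--         numbers[i], numbers[-(i + 1)] = numbers[-(i + 1)], numbers[i]
--
--     swapped_dict = {
--         orig: swapped for orig, swapped in zip(range(1, length + 1), numbers)
--     }
--     return swapped_dict
-- ===== SOURCE B (Python) =====
-- def swap_positions(length):
--     return {i: length + 1 - i for i in range(1, length + 1)}
-- ===== Notes on version B (the rewrite author's own statement) =====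
-- stated objective: simpler
-- what changed: Replaces building a list of consecutive numbers, reversing it in place by pairwise swaps, and zipping it back against the keys, with a single dict comprehension that computes each key's mirror value directly by subtraction.
import Mathlib
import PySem

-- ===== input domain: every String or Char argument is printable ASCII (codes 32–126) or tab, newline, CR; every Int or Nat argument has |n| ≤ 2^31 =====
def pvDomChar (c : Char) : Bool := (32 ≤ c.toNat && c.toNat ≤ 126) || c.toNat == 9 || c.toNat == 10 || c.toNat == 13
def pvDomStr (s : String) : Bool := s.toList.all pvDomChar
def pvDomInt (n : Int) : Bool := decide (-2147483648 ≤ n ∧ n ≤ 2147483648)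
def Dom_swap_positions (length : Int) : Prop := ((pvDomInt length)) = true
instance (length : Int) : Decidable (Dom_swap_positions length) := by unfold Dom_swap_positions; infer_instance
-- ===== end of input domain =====

-- B replaces A's build-reverse-by-swaps-then-zip with one closed-form map i ↦ length+1-i (objective: simpler).

-- ===== PORT A =====
-- one in-place swap step: numbers[i], numbers[-(i+1)] = numbers[-(i+1)], numbers[i]
-- (indices are always in range inside A's loop, so getD's default is never used)
def pySwapStep (xs : List Int) (i : Nat) : List Int :=
  let n := xs.length
  let a := xs.getD i 0
  let b := xs.getD (n - (i + 1)) 0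
  (xs.set i b).set (n - (i + 1)) a

def swap_positions (length : Int) : List (Int × Int) :=
  let numbers := PySem.List.pyRange 1 (length + 1) 1
  let midpoint := PySem.Int.floordiv length 2
  let numbers := (List.range midpoint.toNat).foldl pySwapStep numbers
  List.zip (PySem.List.pyRange 1 (length + 1) 1) numbers

-- ===== PORT B =====
def swap_positions_alt (length : Int) : List (Int × Int) :=
  (PySem.List.pyRange 1 (length + 1) 1).map (fun i => (i, length + 1 - i))

-- ===== PRECONDITION & SPEC =====
def Spec_swap_positions (length : Int) (out : List (Int × Int)) : Prop := out = swap_positions_alt length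
instance (length : Int) (out : List (Int × Int)) : Decidable (Spec_swap_positions length out) := by unfold Spec_swap_positions; infer_instance

-- ===== CLAIM (what is proved, stated in full; the proofs are below) =====
def Claim_equal_swap_positions : Prop := ∀ (length : Int), Dom_swap_positions length → Spec_swap_positions length (swap_positions length)

-- ===== LEMMAS AND PROOFS =====

lemma pySwapStep_length (xs : List Int) (i : Nat) : (pySwapStep xs i).length = xs.length := by
  simp [pySwapStep]

lemma foldl_swap_length (m : Nat) (xs : List Int) :
    ((List.range m).foldl pySwapStep xs).length = xs.length := by
  induction m with
  | zero => simp
  | succ m ih => simp [List.range_succ, List.foldl_append, pySwapStep_length, ih]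

lemma foldl_swap_getElem? (m : Nat) (xs : List Int) :
    2 * m ≤ xs.length → ∀ k : Nat,
    ((List.range m).foldl pySwapStep xs)[k]? =
      if k < m ∨ (xs.length - m ≤ k ∧ k < xs.length) then xs[xs.length - 1 - k]? else xs[k]? := by
  induction m with
  | zero => intro _ k; simp
  | succ m ih =>
    intro h k
    have h' : 2 * m ≤ xs.length := by omega
    have ih' := ih h'
    have hlen : ((List.range m).foldl pySwapStep xs).length = xs.length := foldl_swap_length m xs
    rw [List.range_succ, List.foldl_append]
    simp only [List.foldl_cons, List.foldl_nil]
    set ys := (List.range m).foldl pySwapStep xs with hys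
    have ha : ys[m]? = xs[m]? := by
      rw [ih' m, if_neg]; omega
    have hb : ys[xs.length - (m + 1)]? = xs[xs.length - (m + 1)]? := by
      rw [ih' (xs.length - (m + 1)), if_neg (by omega)]
    have hm : m < xs.length := by omega
    have hm' : xs.length - (m + 1) < xs.length := by omega
    unfold pySwapStep
    simp only [hlen]
    rw [List.getD_eq_getElem?_getD, List.getD_eq_getElem?_getD, ha, hb,
        List.getElem?_eq_getElem hm, List.getElem?_eq_getElem hm']
    simp only [Option.getD_some]
    by_cases hk1 : k = m
    · subst hk1
      rw [List.getElem?_set_ne (by omega), List.getElem?_set_self (by rw [hlen]; omega)]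
      rw [if_pos (by omega)]
      have hidx : xs.length - 1 - k = xs.length - (k + 1) := by omega
      rw [hidx, List.getElem?_eq_getElem hm']
    · by_cases hk2 : k = xs.length - (m + 1)
      · subst hk2
        rw [List.getElem?_set_self (by simp [hlen]; omega)]
        rw [if_pos (by omega)]
        have hidx : xs.length - 1 - (xs.length - (m + 1)) = m := by omega
        rw [hidx, List.getElem?_eq_getElem hm]
      · rw [List.getElem?_set_ne (by omega), List.getElem?_set_ne (by omega), ih' k]
        by_cases hc : k < m ∨ (xs.length - m ≤ k ∧ k < xs.length)
        · rw [if_pos hc, if_pos (by omega)]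
        · rw [if_neg hc, if_neg (by omega)]

-- ===== VERDICT (by name: the statement is the Claim_ definition above) =====
theorem swap_positions_spec : Claim_equal_swap_positions := by
  intro length _
  show List.zip (PySem.List.pyRange 1 (length + 1) 1)
      ((List.range (PySem.Int.floordiv length 2).toNat).foldl pySwapStep
        (PySem.List.pyRange 1 (length + 1) 1)) =
    (PySem.List.pyRange 1 (length + 1) 1).map (fun i => (i, length + 1 - i))
  by_cases hpos : length ≤ 0
  · rw [PySem.List.pyRange_one_eq_nil (by omega)]
    simp
  · rw [not_le] at hpos
    set xs := PySem.List.pyRange 1 (length + 1) 1 with hxs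
    have hxlen : xs.length = length.toNat := by
      rw [hxs, PySem.List.length_pyRange_one]; omega
    have hmid : (PySem.Int.floordiv length 2).toNat = length.toNat / 2 := by
      have h2 : PySem.Int.floordiv length 2 = length / 2 := by
        simp [PySem.Int.floordiv, Int.fdiv_eq_ediv]
      rw [h2]; omega
    rw [hmid]
    set F := (List.range (length.toNat / 2)).foldl pySwapStep xs with hF
    have hFlen : F.length = xs.length := foldl_swap_length _ _
    have hx : ∀ j : Nat, j < length.toNat → xs[j]? = some (1 + (j : Int)) := by
      intro j hj
      rw [hxs, PySem.List.getElem?_pyRange_one, if_pos (by omega)]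
    have hget : ∀ k : Nat, k < length.toNat → F[k]? = some ((length : Int) - k) := by
      intro k hk
      rw [hF, foldl_swap_getElem? _ _ (by omega) k]
      by_cases hc : k < length.toNat / 2 ∨ (xs.length - length.toNat / 2 ≤ k ∧ k < xs.length)
      · rw [if_pos hc, hx _ (by omega)]
        congr 1
        have he : ((xs.length - 1 - k : Nat) : Int) = (length : Int) - 1 - k := by omega
        rw [he]; ring
      · -- middle element of an odd-length list: unchanged, but xs[k] = length - k there
        rw [if_neg hc, hx _ hk]
        congr 1; omega
    apply List.ext_getElem?
    intro k
    by_cases hk : k < length.toNat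
    · have hmap : (xs.map (fun i => (i, length + 1 - i)))[k]? =
          some ((1 + (k : Int), length + 1 - (1 + (k : Int))) : Int × Int) := by
        rw [List.getElem?_map, hx k hk]; rfl
      have hzip : (xs.zip F)[k]? =
          some ((1 + (k : Int), length + 1 - (1 + (k : Int))) : Int × Int) :=
        List.getElem?_zip_eq_some.2 ⟨hx k hk, by rw [hget k hk]; congr 1; ring⟩
      rw [hzip, hmap]
    · rw [List.getElem?_eq_none (l := xs.zip F) (by simp [List.length_zip, hFlen, hxlen]; omega),
          List.getElem?_eq_none (by rw [List.length_map, hxlen]; omega)]
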